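-- pv_equiv track=rewrite | github.com/mattiaTagliente/mars-uav-sizing | tools/split_sections.py | split_subsections
-- ===== SOURCE A (Python) =====
-- from typing import Dict, Iterable, List, Optional, Tuple
--
-- def split_subsections(lines: Iterable[str]) -> Tuple[List[str], List[Tuple[str, List[str]]]]:
--     """
--     Split a section's lines into content before the first level-2 heading and a list of
--     level-2 subsections (heading, lines).
--     """
--     base_lines: List[str] = []
--     subsections: List[Tuple[str, List[str]]] = []
--     current_heading: Optional[str] = None
--     current_lines: List[str] = []
--
--     for line in lines:
--         if line.startswith("## "):
--             if current_heading is None: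
--                 base_lines = current_lines
--             else:
--                 subsections.append((current_heading, current_lines))
--             current_heading = line[3:]
--             current_lines = []
--             continue
--
--         current_lines.append(line)
--
--     if current_heading is None:
--         base_lines = current_lines
--     else:
--         subsections.append((current_heading, current_lines))
--
--     return base_lines, subsections
-- ===== SOURCE B (Python) =====
-- from typing import Iterable, List, Tuple
--
-- def split_subsections(lines: Iterable[str]) -> Tuple[List[str], List[Tuple[str, List[str]]]]:
--     # Single backward pass: flush the pending segment into a subsection on each
--     # '## ' heading; segments and the subsection list are built reversed and
--     # flipped once, so the pass is linear with no Optional heading state.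
--     base: List[str] = []
--     subsections: List[Tuple[str, List[str]]] = []
--     for line in reversed(list(lines)):
--         if line.startswith("## "):
--             base.reverse()
--             subsections.append((line[3:], base))
--             base = []
--         else:
--             base.append(line)
--     base.reverse()
--     subsections.reverse()
--     return base, subsections
-- ===== Notes on version B (the rewrite author's own statement) =====
-- stated objective: alternative
-- what changed: B traverses the lines backwards in one pass, prepending to the current segment and flushing it into a subsection on each '## ' heading, so the Optional current-heading state and the final flush of A disappear.
import Mathlib
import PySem

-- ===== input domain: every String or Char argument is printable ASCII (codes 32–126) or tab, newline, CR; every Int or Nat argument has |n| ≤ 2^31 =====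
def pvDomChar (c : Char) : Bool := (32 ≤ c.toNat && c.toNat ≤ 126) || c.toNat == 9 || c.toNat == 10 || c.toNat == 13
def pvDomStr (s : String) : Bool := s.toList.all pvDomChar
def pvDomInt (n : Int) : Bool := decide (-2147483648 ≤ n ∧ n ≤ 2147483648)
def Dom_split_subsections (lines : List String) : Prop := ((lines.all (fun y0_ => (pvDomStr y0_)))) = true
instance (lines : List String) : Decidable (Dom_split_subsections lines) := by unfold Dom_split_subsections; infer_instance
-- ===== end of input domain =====

-- B replaces A's forward accumulator with an Optional heading by a single backward pass
-- that prepends lines and flushes on each '## ' heading (objective: alternative decomposition).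


-- ===== PORT A =====
-- loop state: (base_lines, subsections, current_heading, current_lines)
def splitStep (st : List String × List (String × List String) × Option String × List String)
    (line : String) : List String × List (String × List String) × Option String × List String :=
  let (base, subs, h, cur) := st
  if PySem.Str.startswith line "## " then
    match h with
    | none => (cur, subs, some (PySem.Str.slice line (some 3) none), [])
    | some hd => (base, subs ++ [(hd, cur)], some (PySem.Str.slice line (some 3) none), [])
  else (base, subs, h, cur ++ [line])

def split_subsections (lines : List String) : List String × (List (String × List String)) :=
  match lines.foldl splitStep ([], [], none, []) with
  | (_, subs, none, cur) => (cur, subs)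
  | (base, subs, some hd, cur) => (base, subs ++ [(hd, cur)])

-- ===== PORT B =====
-- Python B iterates reversed(lines), appending; segments and the subsection list are
-- built reversed and flipped by .reverse() on flush and at the end, exactly as in Source B.
def split_subsections_alt (lines : List String) : List String × (List (String × List String)) :=
  let st := lines.reverse.foldl
    (fun (p : List String × List (String × List String)) line =>
      if PySem.Str.startswith line "## " then
        (([] : List String), p.2 ++ [(PySem.Str.slice line (some 3) none, p.1.reverse)])
      else (p.1 ++ [line], p.2))
    ([], [])
  (st.1.reverse, st.2.reverse)

-- ===== PRECONDITION & SPEC =====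
def Spec_split_subsections (lines : List String) (out : List String × (List (String × List String))) : Prop := out = split_subsections_alt lines
instance (lines : List String) (out : List String × (List (String × List String))) : Decidable (Spec_split_subsections lines out) := by unfold Spec_split_subsections; infer_instance

-- ===== CLAIM (what is proved, stated in full; the proofs are below) =====
def Claim_equal_split_subsections : Prop := ∀ (lines : List String), Dom_split_subsections lines → Spec_split_subsections lines (split_subsections lines)

-- ===== LEMMAS AND PROOFS =====

-- Cons-recursive characterization of B's result (proof device).
def bRec : List String → List String × List (String × List String)
  | [] => ([], [])
  | l :: rest =>
      let p := bRec rest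
      if PySem.Str.startswith l "## " then
        ([], (PySem.Str.slice l (some 3) none, p.1) :: p.2)
      else (l :: p.1, p.2)

-- B's backward foldl-with-append pass produces bRec's components, reversed.
theorem split_alt_foldr (lines : List String) :
    lines.foldr
        (fun line (p : List String × List (String × List String)) =>
          if PySem.Chars.startswith line.toList ['#', '#', ' '] = true then
            (([] : List String), p.2 ++ [(PySem.Str.slice line (some 3) none, p.1.reverse)])
          else (p.1 ++ [line], p.2))
        ([], []) =
      ((bRec lines).1.reverse, (bRec lines).2.reverse) := by
  induction lines with
  | nil => simp [bRec]
  | cons l rest ih =>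
    by_cases hl : PySem.Chars.startswith l.toList ['#', '#', ' '] = true <;>
      simp [bRec, PySem.Str.startswith, hl, ih]

theorem split_alt_eq_bRec (lines : List String) :
    split_subsections_alt lines = bRec lines := by
  unfold split_subsections_alt
  rw [List.foldl_reverse]
  simp only [PySem.Str.startswith]
  have h3 : ("## ".toList : List Char) = ['#', '#', ' '] := rfl
  simp only [h3]
  rw [split_alt_foldr]
  simp

-- Finalization of A's loop state, as A does after the loop.
def splitFin (st : List String × List (String × List String) × Option String × List String) :
    List String × (List (String × List String)) :=
  match st with
  | (_, subs, none, cur) => (cur, subs)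
  | (base, subs, some hd, cur) => (base, subs ++ [(hd, cur)])

-- Invariant: finalizing A's fold from any state equals combining the state with bRec.
theorem split_loop_eq (lines : List String) :
    ∀ (base : List String) (subs : List (String × List String)) (h : Option String)
      (cur : List String),
      splitFin (lines.foldl splitStep (base, subs, h, cur)) =
        match h with
        | none => (cur ++ (bRec lines).1, subs ++ (bRec lines).2)
        | some hd => (base, subs ++ (hd, cur ++ (bRec lines).1) :: (bRec lines).2) := by
  induction lines with
  | nil =>
    intro base subs h cur
    cases h <;> simp [splitFin, bRec]
  | cons l rest ih =>
    intro base subs h cur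
    by_cases hl : PySem.Chars.startswith l.toList ['#', '#', ' '] = true
    · cases h <;>
        simp [List.foldl, splitStep, bRec, PySem.Str.startswith, hl, ih]
    · cases h <;>
        simp [List.foldl, splitStep, bRec, PySem.Str.startswith, hl, ih]

-- ===== VERDICT (by name: the statement is the Claim_ definition above) =====
theorem split_subsections_spec : Claim_equal_split_subsections := by
  intro lines _
  unfold Spec_split_subsections split_subsections
  have h := split_loop_eq lines [] [] none []
  simpa [splitFin, split_alt_eq_bRec] using h
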